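-- pv_equiv track=rewrite | github.com/ajschumacher/dd | dd.py | list_of_dicts_to_triple_set
-- ===== SOURCE A (Python) =====
-- def list_of_dicts_to_triple_set(lod, id_name):
--     ids = set()
--     triple_set = set()
--     for d in lod:
--         if id_name not in d:
--             raise Exception('entity does not have ID ' + id_name)
--         current_id = d[id_name]
--         if current_id in ids:
--             raise Exception('ID ' + current_id + 'is not unique')
--         ids.add(current_id)
--         for prop, value in d.items():
--             if prop == id_name:
--                 continue
--             triple_set.add((current_id, prop, value))
--     return triple_set
-- ===== SOURCE B (Python) =====
-- def list_of_dicts_to_triple_set(lod, id_name):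
--     # Check every dict carries the id key.
--     for d in lod:
--         if id_name not in d:
--             raise Exception('entity does not have ID ' + id_name)
--     # Uniqueness by sort-then-adjacent-scan instead of a hash set of seen ids.
--     ids = sorted(d[id_name] for d in lod)
--     for a, b in zip(ids, ids[1:]):
--         if a == b:
--             raise Exception('ID ' + a + 'is not unique')
--     # Emit the triples.
--     return {(d[id_name], prop, value)
--             for d in lod
--             for prop, value in d.items()
--             if prop != id_name}
-- ===== Notes on version B (the rewrite author's own statement) =====
-- stated objective: alternative
-- what changed: Replaces A's single interleaved loop maintaining a seen-ids hash set with a staged design whose duplicate detection is sort-then-adjacent-scan over the extracted id list; triples are then emitted by one comprehension instead of an inner accumulation loop.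
-- outside the precondition, e.g. on list_of_dicts_to_triple_set([{'a': 'x'}], 'id'): A raises Exception, B raises Exception; on list_of_dicts_to_triple_set([{'id': '1'}, {'id': '1'}], 'id'): A raises Exception, B raises Exception
import Mathlib
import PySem

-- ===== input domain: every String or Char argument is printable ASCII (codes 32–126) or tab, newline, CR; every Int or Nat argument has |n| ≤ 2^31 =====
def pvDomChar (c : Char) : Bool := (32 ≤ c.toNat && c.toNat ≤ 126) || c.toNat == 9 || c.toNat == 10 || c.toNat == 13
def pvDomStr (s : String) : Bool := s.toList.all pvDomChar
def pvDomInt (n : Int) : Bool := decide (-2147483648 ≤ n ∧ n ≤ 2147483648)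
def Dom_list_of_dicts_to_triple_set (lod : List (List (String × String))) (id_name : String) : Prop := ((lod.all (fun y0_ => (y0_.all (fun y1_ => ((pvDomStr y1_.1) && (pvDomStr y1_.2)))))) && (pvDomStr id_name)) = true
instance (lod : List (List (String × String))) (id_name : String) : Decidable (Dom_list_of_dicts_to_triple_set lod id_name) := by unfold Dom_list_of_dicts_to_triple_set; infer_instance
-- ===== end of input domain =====

-- B replaces A's single loop with a seen-ids hash set by staged passes whose duplicate
-- detection is sort-then-adjacent-scan over the id list (alternative decomposition;
-- return value only; both raise — excluded by Pre_ — on missing or duplicate ids).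

-- ===== PORT A =====
-- A's single loop: per dict, check id presence, check uniqueness against the seen-ids
-- set, then add the dict's non-id pairs to the triple set.  'none' = the Python raises
-- (excluded by Pre_).
def pyGoA (id_name : String) : List (List (String × String)) → PySem.Set String → PySem.Set (String × String × String) → Option (List (String × String × String))
  | [], _, tr => some tr
  | d :: rest, ids, tr =>
    match (PySem.Dict.mk d).get? id_name with
    | none => none
    | some cid =>
      if PySem.Set.contains ids cid then none
      else pyGoA id_name rest (PySem.Set.add ids cid)
        (d.foldl (fun t pv => if pv.1 == id_name then t else PySem.Set.add t (cid, pv.1, pv.2)) tr)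

def list_of_dicts_to_triple_set (lod : List (List (String × String))) (id_name : String) : List (String × String × String) :=
  (pyGoA id_name lod PySem.Set.empty PySem.Set.empty).getD []

-- ===== PORT B =====
-- B's presence pass (false = the Python raises; excluded by Pre_).
def pyAllHaveIdB (lod : List (List (String × String))) (id_name : String) : Bool :=
  lod.all (fun d => ((PySem.Dict.mk d).get? id_name).isSome)

-- the extracted id list 'sorted(d[id_name] for d in lod)' is built from; '.getD ""'
-- totalizes d[id_name] (never hit when the presence pass succeeded)
def pyIdsB (lod : List (List (String × String))) (id_name : String) : List String :=
  lod.map (fun d => ((PySem.Dict.mk d).get? id_name).getD "")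

-- B's adjacent-duplicate scan over 'zip(ids, ids[1:])' (false = the Python raises)
def pyNoAdjDupB (ids : List String) : Bool :=
  (ids.zip (ids.drop 1)).all (fun p => p.1 != p.2)

-- B's comprehension emitting the triples
def pyTriplesB (lod : List (List (String × String))) (id_name : String) : List (String × String × String) :=
  PySem.Set.ofList (lod.flatMap (fun d =>
    (d.filter (fun pv => pv.1 != id_name)).map
      (fun pv => (((PySem.Dict.mk d).get? id_name).getD "", pv.1, pv.2))))

def list_of_dicts_to_triple_set_alt (lod : List (List (String × String))) (id_name : String) : List (String × String × String) :=
  if pyAllHaveIdB lod id_name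
     && pyNoAdjDupB (PySem.List.sorted (pyIdsB lod id_name) (fun x => x) false)
  then pyTriplesB lod id_name else []

-- ===== PRECONDITION & SPEC =====
-- Pre_ excludes exactly the inputs where A raises: a dict missing id_name, or two dicts
-- with the same id value.
def Pre_list_of_dicts_to_triple_set (lod : List (List (String × String))) (id_name : String) : Prop :=
  (∀ d ∈ lod, ((PySem.Dict.mk d).get? id_name).isSome) ∧
  (lod.map (fun d => ((PySem.Dict.mk d).get? id_name).getD "")).Nodup

instance (lod : List (List (String × String))) (id_name : String) : Decidable (Pre_list_of_dicts_to_triple_set lod id_name) := by unfold Pre_list_of_dicts_to_triple_set; infer_instance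

def pvWitness_list_of_dicts_to_triple_set : (List (List (String × String))) × String :=
  ([[("id", "1"), ("a", "x")], [("id", "2"), ("b", "y")]], "id")

def Spec_list_of_dicts_to_triple_set (lod : List (List (String × String))) (id_name : String) (out : List (String × String × String)) : Prop := out = list_of_dicts_to_triple_set_alt lod id_name
instance (lod : List (List (String × String))) (id_name : String) (out : List (String × String × String)) : Decidable (Spec_list_of_dicts_to_triple_set lod id_name out) := by unfold Spec_list_of_dicts_to_triple_set; infer_instance

-- ===== CLAIM (what is proved, stated in full; the proofs are below) =====
def Claim_equal_list_of_dicts_to_triple_set : Prop := ∀ (lod : List (List (String × String))) (id_name : String), Dom_list_of_dicts_to_triple_set lod id_name → Pre_list_of_dicts_to_triple_set lod id_name → Spec_list_of_dicts_to_triple_set lod id_name (list_of_dicts_to_triple_set lod id_name)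

-- ===== LEMMAS AND PROOFS =====

-- the id of a dict, and a dict's contribution to the triple set
def pvId (id_name : String) (d : List (String × String)) : String :=
  ((PySem.Dict.mk d).get? id_name).getD ""

def pvG (id_name : String) (d : List (String × String)) : List (String × String × String) :=
  (d.filter (fun pv => pv.1 != id_name)).map (fun pv => (pvId id_name d, pv.1, pv.2))

-- A's inner loop is a Set.update by the dict's contribution
lemma innerA (id_name : String) (cid : String) (d : List (String × String)) (tr : PySem.Set (String × String × String)) :
    d.foldl (fun t pv => if pv.1 == id_name then t else PySem.Set.add t (cid, pv.1, pv.2)) tr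
      = PySem.Set.update tr ((d.filter (fun pv => pv.1 != id_name)).map (fun pv => (cid, pv.1, pv.2))) := by
  induction d generalizing tr with
  | nil => rfl
  | cons pv d ih =>
    simp only [beq_iff_eq] at ih
    by_cases h : pv.1 = id_name
    · simp [List.foldl, h, ih]
    · simp [List.foldl, h, PySem.Set.update_cons, ih]

-- A's loop succeeds and computes the accumulated update, under the validity hypotheses
lemma goA_eq (id_name : String) (lod : List (List (String × String)))
    (ids : PySem.Set String) (tr : PySem.Set (String × String × String))
    (h1 : ∀ d ∈ lod, ((PySem.Dict.mk d).get? id_name).isSome)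
    (h2 : (lod.map (pvId id_name)).Nodup)
    (h3 : ∀ d ∈ lod, pvId id_name d ∉ ids) :
    pyGoA id_name lod ids tr = some (PySem.Set.update tr (lod.flatMap (pvG id_name))) := by
  induction lod generalizing ids tr with
  | nil => simp [pyGoA, PySem.Set.update_nil]
  | cons d rest ih =>
    obtain ⟨cid, hcid⟩ := Option.isSome_iff_exists.mp (h1 d (by simp))
    have hid : pvId id_name d = cid := by simp [pvId, hcid]
    have hnot : cid ∉ ids := hid ▸ h3 d (by simp)
    simp only [pyGoA, hcid]
    rw [if_neg (by simpa [PySem.Set.contains_iff] using hnot)]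
    rw [ih]
    · rw [innerA]
      simp [pvG, hid, PySem.Set.update_append]
    · exact fun e he => h1 e (by simp [he])
    · simp only [List.map_cons, List.nodup_cons] at h2
      exact h2.2
    · simp only [List.map_cons, List.nodup_cons] at h2
      intro e he
      rw [PySem.Set.mem_add]
      rintro (hmem | hEq)
      · exact h3 e (by simp [he]) hmem
      · apply h2.1
        rw [hid, ← hEq]
        exact List.mem_map_of_mem he

-- a Nodup list has no equal adjacent pair
lemma noAdjDup_of_nodup (l : List String) (h : l.Nodup) : pyNoAdjDupB l = true := by
  induction l with
  | nil => rfl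
  | cons x l ih =>
    cases l with
    | nil => rfl
    | cons y t =>
      simp only [List.nodup_cons, List.mem_cons] at h
      have hxy : x ≠ y := fun e => h.1 (Or.inl e)
      have rest := ih (List.nodup_cons.mpr h.2)
      simp only [pyNoAdjDupB, List.drop_succ_cons, List.drop_zero, List.zip_cons_cons,
        List.all_cons, Bool.and_eq_true, bne_iff_ne, ne_eq] at rest ⊢
      exact ⟨hxy, rest⟩

-- B's sorted-adjacent duplicate scan passes under Nodup ids
lemma noAdjDup_sorted (lod : List (List (String × String))) (id_name : String)
    (h2 : (pyIdsB lod id_name).Nodup) :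
    pyNoAdjDupB (PySem.List.sorted (pyIdsB lod id_name) (fun x => x) false) = true := by
  apply noAdjDup_of_nodup
  exact (PySem.List.sorted_perm (pyIdsB lod id_name) (fun x => x) false).nodup_iff.mpr h2

-- ===== VERDICT (by name: the statement is the Claim_ definition above) =====
theorem list_of_dicts_to_triple_set_spec : Claim_equal_list_of_dicts_to_triple_set := by
  intro lod id_name _ hPre
  obtain ⟨h1, h2⟩ := hPre
  have h2' : (lod.map (pvId id_name)).Nodup := h2
  have h3 : ∀ d ∈ lod, pvId id_name d ∉ (PySem.Set.empty : PySem.Set String) := by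
    intro d _ h
    simp [PySem.Set.empty] at h
  have hall : pyAllHaveIdB lod id_name = true := by
    simp only [pyAllHaveIdB, List.all_eq_true]
    exact fun d hd => h1 d hd
  have hsorted := noAdjDup_sorted lod id_name h2
  unfold Spec_list_of_dicts_to_triple_set list_of_dicts_to_triple_set list_of_dicts_to_triple_set_alt
  rw [goA_eq id_name lod _ _ h1 h2' h3, hall, hsorted]
  simp only [Option.getD_some, Bool.and_self, if_true]
  rw [PySem.Set.update_empty]
  rfl
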